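-- pv_equiv track=rewrite | github.com/ta4h1r/weather-app | app/weatherservice/utils.py | build_recommended_action_string
-- ===== SOURCE A (Python) =====
-- def build_recommended_action_string(combination):
--     c = [x for x in combination[-5:] if x is not None]
--     action = ""
--     count = 0
--     for str in c:
--         if count == 0 and count != len(c) - 1:
--             action += str + ", "
--             count += 1
--             continue
--         elif count == 0 and count == len(c) - 1:
--             action += str + "."
--             count += 1
--             break
--         elif count == len(c) - 1:
--             action += "and " + str.lower() + "."
--             count = 0
--             break
--         action += str.lower() + ", "
--         count += 1
--     return action
-- ===== SOURCE B (Python) =====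
-- def build_recommended_action_string(combination):
--     c = [x for x in combination[-5:] if x is not None]
--
--     def middle(xs):
--         # chain of lowercased items, the final one introduced by "and " and closed by "."
--         if len(xs) == 1:
--             return "and " + xs[0].lower() + "."
--         return xs[0].lower() + ", " + middle(xs[1:])
--
--     if not c:
--         return ""
--     if len(c) == 1:
--         return c[0] + "."
--     return c[0] + ", " + middle(c[1:])
-- ===== Notes on version B (the rewrite author's own statement) =====
-- stated objective: simpler
-- what changed: Replaces A's single imperative loop with a mutable counter compared against len(c)-1 and break/continue by a recursive grammar decomposition: the head is emitted verbatim and a recursive helper renders the lowercased tail, deciding the 'and ...' ending at its length-1 base case instead of by counting.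
import Mathlib
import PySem

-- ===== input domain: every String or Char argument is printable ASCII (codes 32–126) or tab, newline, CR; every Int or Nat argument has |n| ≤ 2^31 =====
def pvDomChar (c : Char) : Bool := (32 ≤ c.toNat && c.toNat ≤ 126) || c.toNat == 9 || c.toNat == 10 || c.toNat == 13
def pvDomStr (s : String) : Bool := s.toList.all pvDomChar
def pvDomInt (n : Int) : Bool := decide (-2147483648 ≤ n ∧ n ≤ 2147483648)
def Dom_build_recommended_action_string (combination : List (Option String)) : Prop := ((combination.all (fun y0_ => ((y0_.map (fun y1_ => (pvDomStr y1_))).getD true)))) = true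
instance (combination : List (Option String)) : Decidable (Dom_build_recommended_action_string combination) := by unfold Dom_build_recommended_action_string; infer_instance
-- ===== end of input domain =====

-- B replaces A's counter-driven loop (with break/continue) by a recursive grammar
-- decomposition: head verbatim, then a recursive helper for the lowercased tail — objective: simpler.

-- ===== PORT A =====
-- the for-loop over c with mutable (action, count) and break/continue, as structural recursion;
-- n is len(c), fixed over the loop
def pvALoop (n : Nat) : List String → String → Nat → String
  | [], action, _ => action
  | s :: rest, action, count =>
    if count = 0 ∧ count ≠ n - 1 then
      pvALoop n rest (action ++ (s ++ ", ")) (count + 1)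
    else if count = 0 ∧ count = n - 1 then
      action ++ (s ++ ".")
    else if count = n - 1 then
      action ++ ("and " ++ PySem.Str.lower s ++ ".")
    else
      pvALoop n rest (action ++ (PySem.Str.lower s ++ ", ")) (count + 1)

def build_recommended_action_string (combination : List (Option String)) : String :=
  let c := (PySem.List.slice combination (some (-5)) none).filterMap (fun x => x)
  pvALoop c.length c "" 0

-- ===== PORT B =====
-- B's recursive helper middle(xs): length-1 base case produces "and <x>.",
-- otherwise lowercased head, ", ", recurse on the tail.
-- (Python's middle is never called with []; that case is an unreachable total-function filler.)
def pvMiddle : List String → String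
  | [] => ""
  | [x] => "and " ++ PySem.Str.lower x ++ "."
  | x :: xs => PySem.Str.lower x ++ ", " ++ pvMiddle xs

def build_recommended_action_string_alt (combination : List (Option String)) : String :=
  let c := (PySem.List.slice combination (some (-5)) none).filterMap (fun x => x)
  match c with
  | [] => ""
  | [h] => h ++ "."
  | h :: t => h ++ ", " ++ pvMiddle t

-- ===== PRECONDITION & SPEC =====
def Spec_build_recommended_action_string (combination : List (Option String)) (out : String) : Prop := out = build_recommended_action_string_alt combination
instance (combination : List (Option String)) (out : String) : Decidable (Spec_build_recommended_action_string combination out) := by unfold Spec_build_recommended_action_string; infer_instance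

-- ===== CLAIM (what is proved, stated in full; the proofs are below) =====
def Claim_equal_build_recommended_action_string : Prop := ∀ (combination : List (Option String)), Dom_build_recommended_action_string combination → Spec_build_recommended_action_string combination (build_recommended_action_string combination)

-- ===== LEMMAS AND PROOFS =====

theorem pvALoop_tail (mid : List String) :
    ∀ (last action : String) (count n : Nat), 1 ≤ count → n = count + mid.length + 1 →
    pvALoop n (mid ++ [last]) action count = action ++ pvMiddle (mid ++ [last]) := by
  induction mid with
  | nil =>
    intro last action count n hc hn
    simp only [List.length_nil] at hn
    simp only [List.nil_append, pvALoop, pvMiddle]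
    have h0 : ¬ count = 0 := by omega
    have h1 : count = n - 1 := by omega
    rw [if_neg (by simp [h0]), if_neg (by simp [h0]), if_pos h1]
  | cons m ms ih =>
    intro last action count n hc hn
    simp only [List.length_cons] at hn
    simp only [List.cons_append, pvALoop]
    have h0 : ¬ count = 0 := by omega
    have h1 : ¬ count = n - 1 := by omega
    rw [if_neg (by simp [h0]), if_neg (by simp [h0]), if_neg h1,
      ih last _ (count + 1) n (by omega) (by omega)]
    have hm : pvMiddle (m :: (ms ++ [last])) = PySem.Str.lower m ++ ", " ++ pvMiddle (ms ++ [last]) := by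
      cases ms <;> simp [pvMiddle]
    simp [hm, String.append_assoc]

theorem pv_core (c : List String) :
    pvALoop c.length c "" 0 =
      (match c with
       | [] => ""
       | [h] => h ++ "."
       | h :: t => h ++ ", " ++ pvMiddle t) := by
  match c with
  | [] => simp [pvALoop]
  | [a] => simp [pvALoop]
  | a :: b :: rest =>
    obtain ⟨mid, last, hml⟩ : ∃ mid last, b :: rest = mid ++ [last] := by
      rcases List.eq_nil_or_concat (b :: rest) with h | ⟨mid, last, h⟩
      · simp at h
      · exact ⟨mid, last, by simpa [List.concat_eq_append] using h⟩
    have h2 : (a :: b :: rest : List String) = a :: (mid ++ [last]) := by rw [hml]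
    rw [h2, show (a :: (mid ++ [last]) : List String).length = mid.length + 2 from by simp]
    simp only [pvALoop]
    rw [if_pos (show True ∧ (0:Nat) ≠ mid.length + 2 - 1 from ⟨trivial, by omega⟩),
      pvALoop_tail mid last _ 1 (mid.length + 2) (by omega) (by omega)]
    cases mid <;> simp [String.append_assoc]

-- ===== VERDICT (by name: the statement is the Claim_ definition above) =====
theorem build_recommended_action_string_spec : Claim_equal_build_recommended_action_string := by
  intro combination _
  unfold Spec_build_recommended_action_string build_recommended_action_string build_recommended_action_string_alt
  exact pv_core _
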